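-- pv_equiv track=rewrite | github.com/Morayya-Jain/Gavin-AI | screen/blocklist.py | _match_domain
-- ===== SOURCE A (Python) =====
-- def _match_domain(pattern: str, text: str) -> bool:
--     """
--     Match a domain pattern against text with proper boundary checking.
--
--     Prevents false positives like "x.com" matching "netflix.com".
--     Supports:
--     - Exact match: "x.com" in URL containing "/x.com/"
--     - Protocol prefix: "://x.com"
--     - www prefix: "www.x.com"
--     - Subdomain: ".x.com" (e.g., "mail.x.com")
--
--     Args:
--         pattern: Domain pattern (lowercase)
--         text: Text to search in (lowercase)
--
--     Returns:
--         True if domain pattern matches with proper boundaries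
--     """
--     # If pattern includes protocol prefix (e.g., "://x.com"), match directly
--     if pattern.startswith("://") or pattern.startswith("/"):
--         return pattern in text
--
--     # Check for exact domain boundaries
--     # Valid domain boundaries: start of string, protocol (://), slash (/), dot (.)
--
--     # Match patterns for domain boundaries
--     boundary_prefixes = [
--         f"://{pattern}",      # Protocol: "://x.com"
--         f"://www.{pattern}",  # Protocol with www: "://www.x.com"
--         f".{pattern}",        # Subdomain: ".x.com" (must have preceding char)
--         f"/{pattern}",        # Path start: "/x.com"
--     ]
--
--     for prefix in boundary_prefixes:
--         if prefix in text:
--             return True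
--
--     # Also check if pattern is at the very start (rare but possible)
--     if text.startswith(pattern) or text.startswith(f"www.{pattern}"):
--         return True
--
--     return False
-- ===== SOURCE B (Python) =====
-- def _match_domain(pattern: str, text: str) -> bool:
--     # One left-to-right scan: pattern matches at position 0, or right after a '.' or '/' boundary char.
--     if pattern.startswith("://") or pattern.startswith("/"):
--         return pattern in text
--     if text.startswith(pattern):
--         return True
--     return any(c in "./" and text.startswith(pattern, i + 1)
--                for i, c in enumerate(text))
-- ===== Notes on version B (the rewrite author's own statement) =====
-- stated objective: simpler
-- what changed: Replaces A's four constructed boundary-prefix strings (each scanned separately with 'in') plus two startswith checks by a single left-to-right scan that tries the pattern at position 0 and immediately after each '.' or '/' character.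
import Mathlib
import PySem

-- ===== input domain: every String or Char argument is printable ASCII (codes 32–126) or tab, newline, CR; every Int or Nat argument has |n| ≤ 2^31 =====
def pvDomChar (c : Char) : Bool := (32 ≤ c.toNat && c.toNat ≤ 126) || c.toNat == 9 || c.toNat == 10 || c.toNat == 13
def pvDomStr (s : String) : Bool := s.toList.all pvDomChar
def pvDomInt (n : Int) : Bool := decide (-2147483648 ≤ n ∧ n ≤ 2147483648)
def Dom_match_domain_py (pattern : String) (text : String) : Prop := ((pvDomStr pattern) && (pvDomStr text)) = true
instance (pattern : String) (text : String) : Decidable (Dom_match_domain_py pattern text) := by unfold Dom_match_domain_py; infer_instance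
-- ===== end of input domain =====

-- B replaces A's four substring scans and two startswith checks by a single left-to-right scan
-- that tries the pattern at position 0 and right after each '.' or '/' boundary character (objective: simpler).

-- ===== PORT A =====
def match_domain_py (pattern : String) (text : String) : Bool :=
  if PySem.Str.startswith pattern "://" || PySem.Str.startswith pattern "/" then
    PySem.Str.isIn pattern text
  else
    let boundary_prefixes : List String :=
      ["://" ++ pattern, "://www." ++ pattern, "." ++ pattern, "/" ++ pattern]
    -- the for-loop with early 'return True' over boundary_prefixes
    if boundary_prefixes.any (fun pre => PySem.Str.isIn pre text) then
      true
    else if PySem.Str.startswith text pattern || PySem.Str.startswith text ("www." ++ pattern) then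
      true
    else
      false

-- ===== PORT B =====
-- the generator 'any(c in "./" and text.startswith(pattern, i+1) for i, c in enumerate(text))'
def pvAltScan (p : List Char) : List Char → Bool
  | [] => false
  | c :: rest => ((c == '.' || c == '/') && List.isPrefixOf p rest) || pvAltScan p rest

def match_domain_py_alt (pattern : String) (text : String) : Bool :=
  if PySem.Str.startswith pattern "://" || PySem.Str.startswith pattern "/" then
    PySem.Str.isIn pattern text
  else if PySem.Str.startswith text pattern then
    true
  else
    pvAltScan pattern.toList text.toList

-- ===== PRECONDITION & SPEC =====
def Spec_match_domain_py (pattern : String) (text : String) (out : Bool) : Prop := out = match_domain_py_alt pattern text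
instance (pattern : String) (text : String) (out : Bool) : Decidable (Spec_match_domain_py pattern text out) := by unfold Spec_match_domain_py; infer_instance

-- ===== CLAIM (what is proved, stated in full; the proofs are below) =====
def Claim_equal_match_domain_py : Prop := ∀ (pattern : String) (text : String), Dom_match_domain_py pattern text → Spec_match_domain_py pattern text (match_domain_py pattern text)

-- ===== LEMMAS AND PROOFS =====

-- B's scan finds the pattern preceded by a boundary char iff '.'+pattern or '/'+pattern is a substring
theorem pvAltScan_iff (p s : List Char) :
    pvAltScan p s = true ↔ ('.' :: p) <:+: s ∨ ('/' :: p) <:+: s := by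
  induction s with
  | nil => simp [pvAltScan]
  | cons c rest ih =>
    simp only [pvAltScan, Bool.or_eq_true, Bool.and_eq_true, beq_iff_eq,
      List.isPrefixOf_iff_prefix, ih, List.infix_cons_iff, List.cons_prefix_cons]
    tauto

theorem match_domain_py_spec : Claim_equal_match_domain_py := by
  intro pattern text _
  unfold Spec_match_domain_py match_domain_py match_domain_py_alt
  by_cases h : (PySem.Str.startswith pattern "://" || PySem.Str.startswith pattern "/") = true
  · rw [if_pos h, if_pos h]
  · rw [if_neg h, if_neg h]
    rw [Bool.eq_iff_iff]
    have h1 : (':' :: '/' :: '/' :: pattern.toList) <:+: text.toList →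
        ('/' :: pattern.toList) <:+: text.toList :=
      fun hx => List.IsInfix.trans ⟨[':', '/'], [], by simp⟩ hx
    have h2 : (':' :: '/' :: '/' :: 'w' :: 'w' :: 'w' :: '.' :: pattern.toList) <:+: text.toList →
        ('.' :: pattern.toList) <:+: text.toList :=
      fun hx => List.IsInfix.trans ⟨[':', '/', '/', 'w', 'w', 'w'], [], by simp⟩ hx
    have h3 : ('w' :: 'w' :: 'w' :: '.' :: pattern.toList) <+: text.toList →
        ('.' :: pattern.toList) <:+: text.toList :=
      fun hx => List.IsInfix.trans ⟨['w', 'w', 'w'], [], by simp⟩ hx.isInfix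
    simp [List.any_cons, List.any_nil, PySem.Str.isIn_iff_infix, PySem.Chars.isIn_iff_infix,
      PySem.Str.startswith_eq, PySem.Chars.startswith_iff, String.toList_append, pvAltScan_iff]
    tauto
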